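-- pv_equiv track=rewrite | github.com/SohailBhatti-777/IEC_Portfolio_1 | Portfolio_Bcopy/main.py | calculate_stone_score
-- ===== SOURCE A (Python) =====
-- def calculate_stone_score(building):
--     score = 0
--     for row_index, row in enumerate(building):
--         for dies in row:
--             if str(dies).startswith("S"):
--                 level = row_index + 1   # level of the building
--                 if level == 1:
--                     score += 2
--                 elif level == 2:
--                     score += 3
--                 elif level == 3:
--                     score += 5
--                 else:
--                     score += 8
--     return score
-- ===== SOURCE B (Python) =====
-- def _stones(cells):
--     return sum(str(d).startswith("S") for d in cells)
--
--
-- def calculate_stone_score(building):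
--     # count every stone in the grid at the top weight (8) ...
--     score = 8 * sum(_stones(row) for row in building)
--     # ... then discount the first three levels down to their true weights
--     for discount, row in zip((6, 5, 3), building):
--         score -= discount * _stones(row)
--     return score
-- ===== Notes on version B (the rewrite author's own statement) =====
-- stated objective: alternative
-- what changed: Replaces per-level weighting inside the scan by a level-oblivious global stone count at weight 8 followed by a closed-form discount correction (6,5,3) applied only to the first three rows.
import Mathlib
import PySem

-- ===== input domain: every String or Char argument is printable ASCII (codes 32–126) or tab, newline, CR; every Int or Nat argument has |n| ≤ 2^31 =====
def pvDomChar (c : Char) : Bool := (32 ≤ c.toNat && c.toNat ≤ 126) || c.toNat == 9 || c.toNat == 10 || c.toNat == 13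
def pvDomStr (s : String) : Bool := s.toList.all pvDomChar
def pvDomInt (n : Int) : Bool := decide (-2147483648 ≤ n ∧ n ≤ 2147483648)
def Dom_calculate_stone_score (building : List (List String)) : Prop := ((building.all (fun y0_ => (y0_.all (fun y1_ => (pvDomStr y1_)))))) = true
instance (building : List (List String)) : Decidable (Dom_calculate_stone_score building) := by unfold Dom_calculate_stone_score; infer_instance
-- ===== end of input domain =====

-- B drops per-level weighting entirely: it counts all stones once at the top weight 8,
-- then subtracts closed-form discounts (6,5,3) for the first three rows only; same cost.

-- ===== PORT A =====
def calculate_stone_score (building : List (List String)) : Int :=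
  (PySem.List.enumerate building).foldl (fun score p =>
    p.2.foldl (fun sc dies =>
      if PySem.Str.startswith dies "S" then
        let level : Int := p.1 + 1
        if level = 1 then sc + 2
        else if level = 2 then sc + 3
        else if level = 3 then sc + 5
        else sc + 8
      else sc) score) 0

-- ===== PORT B =====
-- _stones(cells): sum of booleans str(d).startswith("S")
def pvStones (cells : List String) : Int :=
  (cells.map (fun d => if PySem.Str.startswith d "S" then (1 : Int) else 0)).sum

def calculate_stone_score_alt (building : List (List String)) : Int :=
  let score := 8 * (building.map pvStones).sum
  (List.zip [(6 : Int), 5, 3] building).foldl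
    (fun s p => s - p.1 * pvStones p.2) score

-- ===== PRECONDITION & SPEC =====
def Spec_calculate_stone_score (building : List (List String)) (out : Int) : Prop := out = calculate_stone_score_alt building
instance (building : List (List String)) (out : Int) : Decidable (Spec_calculate_stone_score building out) := by unfold Spec_calculate_stone_score; infer_instance

-- ===== CLAIM (what is proved, stated in full; the proofs are below) =====
def Claim_equal_calculate_stone_score : Prop := ∀ (building : List (List String)), Dom_calculate_stone_score building → Spec_calculate_stone_score building (calculate_stone_score building)

-- ===== LEMMAS AND PROOFS =====

-- the weight A's branch chain adds at level i+1 (proof-side abbreviation)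
def pvW (level : Int) : Int :=
  if level = 1 then 2 else if level = 2 then 3 else if level = 3 then 5 else 8

-- A's inner loop over one row adds pvW (i+1) per stone cell
theorem pv_inner_eq (row : List String) (i s : Int) :
    row.foldl (fun sc dies =>
      if PySem.Str.startswith dies "S" then
        let level : Int := i + 1
        if level = 1 then sc + 2
        else if level = 2 then sc + 3
        else if level = 3 then sc + 5
        else sc + 8
      else sc) s
      = s + pvStones row * pvW (i + 1) := by
  induction row generalizing s with
  | nil => simp [pvStones]
  | cons d t ih =>
    simp only [List.foldl_cons]
    by_cases h : PySem.Str.startswith d "S" = true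
    · simp only [h, if_pos]
      rw [ih]
      simp only [pvStones, List.map_cons, List.sum_cons, h, if_pos]
      unfold pvW
      split_ifs <;> ring
    · simp only [h, Bool.false_eq_true, if_neg, not_false_iff]
      rw [ih]
      have hs : pvStones (d :: t) = pvStones t := by
        simp only [pvStones, List.map_cons, List.sum_cons]
        rw [if_neg h]; ring
      rw [hs]

-- rows at index ≥ 3 all score at weight 8
theorem pv_tail_eq (t : List (List String)) (n s : Int) (hn : 3 ≤ n) :
    (PySem.List.enumerate t n).foldl
        (fun score p => score + pvStones p.2 * pvW (p.1 + 1)) s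
      = s + 8 * (t.map pvStones).sum := by
  induction t generalizing n s with
  | nil => simp [PySem.List.enumerate_nil]
  | cons r t ih =>
    rw [PySem.List.enumerate_cons, List.foldl_cons, ih (n + 1) _ (by omega)]
    have hw : pvW (n + 1) = 8 := by unfold pvW; split_ifs <;> omega
    simp only [List.map_cons, List.sum_cons, hw]
    ring

-- ===== VERDICT (by name: the statement is the Claim_ definition above) =====
theorem calculate_stone_score_spec : Claim_equal_calculate_stone_score := by
  intro building _
  unfold Spec_calculate_stone_score calculate_stone_score calculate_stone_score_alt
  match building with
  | [] => simp [PySem.List.enumerate_nil]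
  | [a] =>
      simp only [PySem.List.enumerate_cons, PySem.List.enumerate_nil, List.foldl_cons,
        List.foldl_nil, List.zip, List.zipWith, List.map_cons, List.map_nil, List.sum_cons,
        List.sum_nil, pv_inner_eq]
      unfold pvW; norm_num; ring
  | [a, b] =>
      simp only [PySem.List.enumerate_cons, PySem.List.enumerate_nil, List.foldl_cons,
        List.foldl_nil, List.zip, List.zipWith, List.map_cons, List.map_nil, List.sum_cons,
        List.sum_nil, pv_inner_eq]
      unfold pvW; norm_num; ring
  | a :: b :: c :: t =>
      simp only [PySem.List.enumerate_cons, List.foldl_cons, List.zip, List.zipWith,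
        List.map_cons, List.sum_cons, pv_inner_eq, List.foldl_nil]
      rw [pv_tail_eq t (0 + 1 + 1 + 1) _ (by norm_num)]
      unfold pvW; norm_num; ring
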